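-- pv_equiv track=rewrite | github.com/BertRules/Global_reconstruction_of_language_models_with_linguistic_rules | rule/aspectrulemine.py | __get_term_pos_type_asp
-- ===== SOURCE A (Python) =====
-- def __get_term_pos_type_asp(term_pos_tags):
--     for t in term_pos_tags:
--         if t  == 'ASP_A':
--             return 'ASP_A'
--     for t in term_pos_tags:
--         if t == 'ASP_O':
--             return 'ASP_O'
--     return None
-- ===== SOURCE B (Python) =====
-- def __get_term_pos_type_asp(term_pos_tags):
--     seen_o = False
--     for t in term_pos_tags:
--         if t == 'ASP_A':
--             return 'ASP_A'
--         if t == 'ASP_O':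
--             seen_o = True
--     return 'ASP_O' if seen_o else None
-- ===== Notes on version B (the rewrite author's own statement) =====
-- stated objective: simpler
-- what changed: Replaces A's two sequential scans with one single pass that returns immediately on 'ASP_A' and tracks 'ASP_O' in a boolean flag resolved after the loop.
import Mathlib
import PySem

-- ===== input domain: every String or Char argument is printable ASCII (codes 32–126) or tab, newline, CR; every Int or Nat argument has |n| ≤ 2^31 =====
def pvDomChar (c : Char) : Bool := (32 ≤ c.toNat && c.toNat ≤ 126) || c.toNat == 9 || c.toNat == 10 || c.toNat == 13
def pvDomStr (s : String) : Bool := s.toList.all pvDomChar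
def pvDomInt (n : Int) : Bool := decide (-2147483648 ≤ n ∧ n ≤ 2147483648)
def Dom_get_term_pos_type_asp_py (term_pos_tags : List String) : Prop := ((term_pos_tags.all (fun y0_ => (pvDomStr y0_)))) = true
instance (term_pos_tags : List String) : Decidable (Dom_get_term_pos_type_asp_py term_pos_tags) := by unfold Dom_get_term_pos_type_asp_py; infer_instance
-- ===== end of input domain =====

-- B merges A's two sequential scans into one pass with a seen-'ASP_O' flag; same return value on all inputs.


-- ===== PORT A =====
-- first loop: return 'ASP_A' on a match, else fall through
def aScanA : List String → Option String
  | [] => none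
  | t :: ts => if t = "ASP_A" then some "ASP_A" else aScanA ts

-- second loop: return 'ASP_O' on a match, else None
def aScanO : List String → Option String
  | [] => none
  | t :: ts => if t = "ASP_O" then some "ASP_O" else aScanO ts

def get_term_pos_type_asp_py (term_pos_tags : List String) : Option String :=
  match aScanA term_pos_tags with
  | some s => some s
  | none => aScanO term_pos_tags

-- ===== PORT B =====
-- single pass carrying the seen-'ASP_O' flag
def bScan : List String → Bool → Option String
  | [], seen => if seen then some "ASP_O" else none
  | t :: ts, seen =>
    if t = "ASP_A" then some "ASP_A"
    else bScan ts (seen || (t = "ASP_O"))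

def get_term_pos_type_asp_py_alt (term_pos_tags : List String) : Option String :=
  bScan term_pos_tags false

-- ===== PRECONDITION & SPEC =====
def Spec_get_term_pos_type_asp_py (term_pos_tags : List String) (out : Option String) : Prop := out = get_term_pos_type_asp_py_alt term_pos_tags
instance (term_pos_tags : List String) (out : Option String) : Decidable (Spec_get_term_pos_type_asp_py term_pos_tags out) := by unfold Spec_get_term_pos_type_asp_py; infer_instance

-- ===== CLAIM (what is proved, stated in full; the proofs are below) =====
def Claim_equal_get_term_pos_type_asp_py : Prop := ∀ (term_pos_tags : List String), Dom_get_term_pos_type_asp_py term_pos_tags → Spec_get_term_pos_type_asp_py term_pos_tags (get_term_pos_type_asp_py term_pos_tags)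

-- ===== LEMMAS AND PROOFS =====
-- the one-pass scan equals: first scan for 'ASP_A'; on failure, the flag (if set) or the 'ASP_O' scan
theorem bScan_eq (l : List String) (seen : Bool) :
    bScan l seen = match aScanA l with
      | some s => some s
      | none => if seen then some "ASP_O" else aScanO l := by
  induction l generalizing seen with
  | nil => cases seen <;> simp [bScan, aScanA, aScanO]
  | cons t ts ih =>
    by_cases ha : t = "ASP_A"
    · simp [bScan, aScanA, ha]
    · by_cases ho : t = "ASP_O" <;> cases seen <;>
        simp [bScan, aScanA, aScanO, ha, ho, ih]

-- ===== VERDICT (by name: the statement is the Claim_ definition above) =====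
theorem get_term_pos_type_asp_py_spec : Claim_equal_get_term_pos_type_asp_py := by
  intro l _
  unfold Spec_get_term_pos_type_asp_py get_term_pos_type_asp_py get_term_pos_type_asp_py_alt
  rw [bScan_eq]
  cases aScanA l <;> simp
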